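-- pv_equiv track=rewrite | github.com/DarshilPatel99/Sum_of_3_Palindromes | functions.py | gt_eq
-- ===== SOURCE A (Python) =====
-- def gt_eq(n,m):
--     if len(n)>len(m):
--         return True
--     elif len(n)<len(m):
--         return False
--     else:
--         l = len(n)
--         for i in range(l-1,-1,-1):
--             if(n[i]>m[i]):
--                 return True
--             elif n[i]<m[i]:
--                 return False
--         return True
-- ===== SOURCE B (Python) =====
-- def gt_eq(n, m):
--     if len(n) != len(m):
--         return len(n) > len(m)
--     verdict = True
--     for a, b in zip(n, m):
--         if a != b:
--             verdict = a > b
--     return verdict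
-- ===== Notes on version B (the rewrite author's own statement) =====
-- stated objective: alternative
-- what changed: Replaces the backward early-return index loop with a single forward pass over zip(n,m) keeping a 'last difference wins' verdict accumulator (the last differing position in a forward scan is the first one the backward scan sees), with no early exit and no indexing.
import Mathlib
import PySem

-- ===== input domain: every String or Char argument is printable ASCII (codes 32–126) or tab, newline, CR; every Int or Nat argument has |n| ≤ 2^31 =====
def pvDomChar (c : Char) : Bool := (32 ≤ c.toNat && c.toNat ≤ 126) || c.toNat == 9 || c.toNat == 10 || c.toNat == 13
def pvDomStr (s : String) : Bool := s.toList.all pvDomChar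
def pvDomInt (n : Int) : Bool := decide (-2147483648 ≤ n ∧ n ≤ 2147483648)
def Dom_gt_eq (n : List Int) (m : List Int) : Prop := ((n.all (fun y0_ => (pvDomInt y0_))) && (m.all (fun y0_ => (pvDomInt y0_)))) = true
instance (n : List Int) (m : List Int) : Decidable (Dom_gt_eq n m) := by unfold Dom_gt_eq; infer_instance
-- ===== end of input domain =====

-- B replaces A's backward early-return index loop with one forward fold over
-- zip(n,m) keeping a 'last difference wins' verdict accumulator (alternative).

-- ===== PORT A =====
-- the for-loop 'for i in range(l-1,-1,-1)' with early returns: fuel k means the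
-- current index is k-1; indices are always in range, so getD 0 is never taken.
def gt_eq_loop (n : List Int) (m : List Int) : Nat → Bool
  | 0 => true
  | k + 1 =>
    let a := (PySem.List.pyGet? n (k : Int)).getD 0
    let b := (PySem.List.pyGet? m (k : Int)).getD 0
    if a > b then true
    else if a < b then false
    else gt_eq_loop n m k

def gt_eq (n : List Int) (m : List Int) : Bool :=
  if n.length > m.length then true
  else if n.length < m.length then false
  else gt_eq_loop n m n.length

-- ===== PORT B =====
def gt_eq_alt (n : List Int) (m : List Int) : Bool :=
  if n.length ≠ m.length then decide (n.length > m.length)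
  else (n.zip m).foldl (fun v p => if p.1 ≠ p.2 then decide (p.1 > p.2) else v) true

-- ===== PRECONDITION & SPEC =====
def Spec_gt_eq (n : List Int) (m : List Int) (out : Bool) : Prop := out = gt_eq_alt n m
instance (n : List Int) (m : List Int) (out : Bool) : Decidable (Spec_gt_eq n m out) := by unfold Spec_gt_eq; infer_instance

-- ===== CLAIM (what is proved, stated in full; the proofs are below) =====
def Claim_equal_gt_eq : Prop := ∀ (n : List Int) (m : List Int), Dom_gt_eq n m → Spec_gt_eq n m (gt_eq n m)

-- ===== LEMMAS AND PROOFS =====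

-- A's backward loop on fuel k equals B's forward fold over the first k zipped pairs.
theorem loop_eq_fold (n m : List Int) (k : Nat)
    (hk : k ≤ n.length) (hk' : k ≤ m.length) :
    gt_eq_loop n m k
      = ((n.zip m).take k).foldl
          (fun v p => if p.1 ≠ p.2 then decide (p.1 > p.2) else v) true := by
  induction k with
  | zero => simp [gt_eq_loop]
  | succ k ih =>
    have hkn : k < n.length := by omega
    have hkm : k < m.length := by omega
    have hkz : k < (n.zip m).length := by simp [List.length_zip]; omega
    have htake : (n.zip m).take (k+1) = (n.zip m).take k ++ [(n[k], m[k])] := by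
      rw [List.take_add_one, List.getElem?_eq_getElem hkz]
      simp
    have ha : PySem.List.pyGet? n (k : Int) = some n[k] := by simp [hkn]
    have hb : PySem.List.pyGet? m (k : Int) = some m[k] := by simp [hkm]
    rw [htake, List.foldl_append]
    simp only [gt_eq_loop, ha, hb, Option.getD_some, List.foldl_cons, List.foldl_nil]
    split_ifs with h h' <;> simp_all
    · omega
    · exact ih (by omega) (by omega)

-- ===== VERDICT (by name: the statement is the Claim_ definition above) =====
theorem gt_eq_spec : Claim_equal_gt_eq := by
  intro n m _
  show gt_eq n m = gt_eq_alt n m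
  unfold gt_eq gt_eq_alt
  by_cases h : n.length = m.length
  · have hl := loop_eq_fold n m n.length le_rfl (le_of_eq h)
    rw [List.take_of_length_le (by simp [List.length_zip])] at hl
    rw [if_neg (by omega), if_neg (by omega), if_neg (by omega)]
    exact hl
  · rcases Nat.lt_or_gt_of_ne h with hlt | hgt
    · rw [if_neg (by omega), if_pos hlt, if_pos (by omega)]
      exact (decide_eq_false (by omega)).symm
    · rw [if_pos hgt, if_pos (by omega)]
      exact (decide_eq_true (by omega)).symm
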